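-- pv_equiv track=rewrite | github.com/jishakoshy/Practice | python/largestodd.py | second_large_odd
-- ===== SOURCE A (Python) =====
-- def second_large_odd(list1):
--     largest_odd = None
--     second_largest_odd = None
--
--     for num in list1:
--         if num % 2 != 0:
--             if largest_odd is None or num > largest_odd:
--                 second_largest_odd = largest_odd
--                 largest_odd = num
--             elif second_largest_odd is None or num > second_largest_odd:
--                 second_largest_odd = num
--     return second_largest_odd
-- ===== SOURCE B (Python) =====
-- def second_large_odd(list1):
--     odds = sorted((x for x in list1 if x % 2 != 0), reverse=True)
--     return odds[1] if len(odds) >= 2 else None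
-- ===== Notes on version B (the rewrite author's own statement) =====
-- stated objective: simpler
-- what changed: Replaced the single-pass running top-two tracker (nested is-None/comparison branches) with filter-odds, sort descending, return index 1.
import Mathlib
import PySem

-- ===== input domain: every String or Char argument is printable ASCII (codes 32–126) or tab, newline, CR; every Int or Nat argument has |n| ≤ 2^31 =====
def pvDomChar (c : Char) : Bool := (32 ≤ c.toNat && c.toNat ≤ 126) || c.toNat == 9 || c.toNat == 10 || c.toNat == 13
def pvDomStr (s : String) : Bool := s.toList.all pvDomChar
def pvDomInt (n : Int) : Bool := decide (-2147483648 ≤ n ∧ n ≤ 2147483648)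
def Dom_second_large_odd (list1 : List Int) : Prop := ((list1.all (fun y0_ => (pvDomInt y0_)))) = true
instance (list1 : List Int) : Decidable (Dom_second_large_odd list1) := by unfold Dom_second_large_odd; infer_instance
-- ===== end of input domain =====

-- B replaces A's single-pass running top-two tracker with filter-odds / sort-descending / take index 1 (objective: simpler).

-- ===== PORT A =====
-- loop body of A: state = (largest_odd, second_largest_odd)
def second_large_odd_step (st : Option Int × Option Int) (num : Int) : Option Int × Option Int :=
  if PySem.Int.mod num 2 ≠ 0 then
    if (st.1.elim true (fun l => decide (num > l))) = true then (some num, st.1)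
    else if (st.2.elim true (fun s => decide (num > s))) = true then (st.1, some num)
    else st
  else st

def second_large_odd (list1 : List Int) : Option Int :=
  (list1.foldl second_large_odd_step (none, none)).2

-- ===== PORT B =====
def second_large_odd_alt (list1 : List Int) : Option Int :=
  let odds := list1.filter (fun x => PySem.Int.mod x 2 ≠ 0)
  let s := PySem.List.sorted odds (fun x => x) true
  if 2 ≤ s.length then s[1]? else none

-- ===== PRECONDITION & SPEC =====
def Spec_second_large_odd (list1 : List Int) (out : Option Int) : Prop := out = second_large_odd_alt list1
instance (list1 : List Int) (out : Option Int) : Decidable (Spec_second_large_odd list1 out) := by unfold Spec_second_large_odd; infer_instance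

-- ===== CLAIM (what is proved, stated in full; the proofs are below) =====
def Claim_equal_second_large_odd : Prop := ∀ (list1 : List Int), Dom_second_large_odd list1 → Spec_second_large_odd list1 (second_large_odd list1)

-- ===== LEMMAS AND PROOFS =====

-- first two elements of a list, as A's state pair
def pvFirst2 : List Int → Option Int × Option Int
  | [] => (none, none)
  | [a] => (some a, none)
  | a :: b :: _ => (some a, some b)

def pvIns (x : Int) (s : List Int) : List Int :=
  PySem.List.insertBy (fun a b => decide (b < a)) x s

-- A's odd-branch update of the top-two state equals inserting into the descending list and re-taking the first two
theorem pvStep_first2 (x : Int) (s : List Int) (hx : PySem.Int.mod x 2 ≠ 0) :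
    second_large_odd_step (pvFirst2 s) x = pvFirst2 (pvIns x s) := by
  have h2x : x % 2 = 1 := by
    have := hx; simp at this; omega
  match s with
  | [] => simp [second_large_odd_step, pvFirst2, pvIns, PySem.List.insertBy, h2x]
  | [a] =>
    by_cases h : a < x <;>
      simp [second_large_odd_step, pvFirst2, pvIns, PySem.List.insertBy, h2x, h, not_lt.mp]
  | a :: b :: t =>
    by_cases h1 : a < x
    · simp [second_large_odd_step, pvFirst2, pvIns, PySem.List.insertBy, h2x, h1]
    · by_cases h2 : b < x <;>
        simp [second_large_odd_step, pvFirst2, pvIns, PySem.List.insertBy, h2x, h1, h2]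

-- A's fold tracks the first two elements of the insertion-built descending list
theorem pvFold_first2 (l : List Int) (s : List Int) :
    l.foldl second_large_odd_step (pvFirst2 s) =
      pvFirst2 (l.foldl (fun acc x => if PySem.Int.mod x 2 ≠ 0 then pvIns x acc else acc) s) := by
  induction l generalizing s with
  | nil => rfl
  | cons x t ih =>
    simp only [List.foldl_cons]
    by_cases hx : PySem.Int.mod x 2 ≠ 0
    · rw [pvStep_first2 x s hx, if_pos hx, ih]
    · rw [if_neg hx]
      have h2x : x % 2 = 0 := by
        have := not_not.mp hx; simp at this; omega
      have : second_large_odd_step (pvFirst2 s) x = pvFirst2 s := by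
        simp [second_large_odd_step, h2x]
      rw [this, ih]

-- folding the guarded insert over l is folding the insert over the odd filter
theorem pvFold_filter (l : List Int) (s : List Int) :
    l.foldl (fun acc x => if PySem.Int.mod x 2 ≠ 0 then pvIns x acc else acc) s =
      (l.filter (fun x => PySem.Int.mod x 2 ≠ 0)).foldl (fun acc x => pvIns x acc) s := by
  induction l generalizing s with
  | nil => rfl
  | cons x t ih =>
    simp only [List.foldl_cons, List.filter_cons]
    by_cases hx : PySem.Int.mod x 2 ≠ 0
    · rw [if_pos hx, if_pos (show decide (PySem.Int.mod x 2 ≠ 0) = true by simpa using hx),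
        List.foldl_cons]
      exact ih (pvIns x s)
    · rw [if_neg hx, if_neg (show ¬ decide (PySem.Int.mod x 2 ≠ 0) = true by simpa using hx)]
      exact ih s

-- B's descending sort is the insertion fold (the library's rfl characterisation, specialised to pvIns)
theorem pvSorted_eq (xs : List Int) :
    PySem.List.sorted xs (fun x => x) true = xs.foldl (fun acc x => pvIns x acc) [] := by
  rw [PySem.List.sorted_rev_eq_foldl_insertBy]
  rfl

-- the second component of pvFirst2 is the index-1 lookup B performs
theorem pvFirst2_snd (s : List Int) :
    (pvFirst2 s).2 = if 2 ≤ s.length then s[1]? else none := by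
  match s with
  | [] => rfl
  | [a] => rfl
  | a :: b :: t => simp [pvFirst2]

-- ===== VERDICT (by name: the statement is the Claim_ definition above) =====
theorem second_large_odd_spec : Claim_equal_second_large_odd := by
  intro l _
  show second_large_odd l = second_large_odd_alt l
  have halt : second_large_odd_alt l =
      (if 2 ≤ (PySem.List.sorted (l.filter (fun x => PySem.Int.mod x 2 ≠ 0)) (fun x => x) true).length
       then (PySem.List.sorted (l.filter (fun x => PySem.Int.mod x 2 ≠ 0)) (fun x => x) true)[1]? else none) := rfl
  have h0 : ((none, none) : Option Int × Option Int) = pvFirst2 ([] : List Int) := rfl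
  rw [halt, pvSorted_eq]
  unfold second_large_odd
  rw [h0, pvFold_first2, pvFold_filter]
  exact pvFirst2_snd _
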